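-- pv_equiv track=rewrite | github.com/SoftwareProcess/rubik-JoonhaKim713 | rubik/check.py | _check
-- ===== SOURCE A (Python) =====
-- def _check(parms):
--     result={}
--
--
--
--     '''
--     is present (V)
--     is a string (V)
--     has 54 elements (V)
--     has 9 occurrences of 6 colors (V)
--     has each middle face being a different color (V)
--     '''
--     encodedCube = parms.get('cube', None)
--
--     count={}
--
--
--
--
--     if (encodedCube == None):
--         result['status'] = 'error: cube is none'
--         return result
--
--     elif (encodedCube == ''):
--         result['status'] = 'error: there is empty cube input'
--         return result
--
--     elif ((str(type(encodedCube)) != "<class 'str'>")):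
--         result['status'] = 'error: Invalid cube input type'
--         return result
--
--     else:
--         lists = list(encodedCube)
--
--
--     numCnt = False
--
--     for i in lists:
--
--         try: count[i] += 1
--         except: count[i]=1
--
--     for j in count.values():
--         if (9 != j):
--             numCnt = True
--             break
--
--
--     k = 4
--     l = k + 9
--     faceCheck = False
--
--     while k <= len(lists):
--         while l < len(lists):
--             if lists[k] == lists[l]:
--                 faceCheck = True
--             l += 9
--         l = k + 18
--         k += 9
--
--
--
--
--     if(len(lists) != 54):
--         result['status'] = 'error: Invalid number of total cube elements'
--
--     elif(len(count) != 6):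
--         result['status'] = 'error: Cube does not have 6 colors.'
--
--     elif(numCnt):
--         result['status'] = 'error: Some cube color may not have 9 occurrences'
--
--     elif(faceCheck):
--         result['status'] = 'error: Invalid cube middle face color'
--
--     else:
--         result['status'] = 'ok'
--
--     return result
-- ===== SOURCE B (Python) =====
-- def _check(parms):
--     result = {}
--     encodedCube = parms.get('cube', None)
--     if encodedCube is None:
--         result['status'] = 'error: cube is none'
--     elif encodedCube == '':
--         result['status'] = 'error: there is empty cube input'
--     elif not isinstance(encodedCube, str):
--         result['status'] = 'error: Invalid cube input type'
--     elif len(encodedCube) != 54: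
--         result['status'] = 'error: Invalid number of total cube elements'
--     elif len(set(encodedCube)) != 6:
--         result['status'] = 'error: Cube does not have 6 colors.'
--     elif any(encodedCube.count(c) != 9 for c in set(encodedCube)):
--         result['status'] = 'error: Some cube color may not have 9 occurrences'
--     elif len(set(encodedCube[4::9])) != 6:
--         result['status'] = 'error: Invalid cube middle face color'
--     else:
--         result['status'] = 'ok'
--     return result
-- ===== Notes on version B (the rewrite author's own statement) =====
-- stated objective: simpler
-- what changed: Replaces A's hand-built counting dict with its break-loop over the values and A's O(k^2) nested while-loop pairwise scan of the middle-face indices by set cardinality and per-colour count checks in one early-exit elif cascade, keeping every error message and its priority order.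
import Mathlib
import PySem

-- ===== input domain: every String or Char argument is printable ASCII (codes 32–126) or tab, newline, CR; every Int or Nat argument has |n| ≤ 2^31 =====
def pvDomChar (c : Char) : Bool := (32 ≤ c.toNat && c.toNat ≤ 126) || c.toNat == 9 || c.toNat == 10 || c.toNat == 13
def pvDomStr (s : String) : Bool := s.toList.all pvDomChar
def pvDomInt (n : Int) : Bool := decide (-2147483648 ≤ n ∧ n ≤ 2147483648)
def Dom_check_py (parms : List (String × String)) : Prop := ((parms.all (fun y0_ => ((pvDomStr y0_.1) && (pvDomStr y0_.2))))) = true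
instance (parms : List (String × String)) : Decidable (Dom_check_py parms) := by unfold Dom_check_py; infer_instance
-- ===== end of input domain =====

-- B replaces A's counting dict, A's break-loop over its values and A's O(k²) nested while-loop over
-- the middle-face indices by set-cardinality / per-colour count checks in one elif cascade
-- (objective: simpler; same results, including the error-priority order).

-- ===== PORT A =====
def check_py (parms : List (String × String)) : List (String × String) :=
  -- result = {}; encodedCube = parms.get('cube', None); the returned dict is {'status': msg}
  match PySem.Dict.get? (PySem.Dict.mk parms) "cube" with
  | none => [("status", "error: cube is none")]                 -- encodedCube == None
  | some encodedCube =>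
    if encodedCube = "" then [("status", "error: there is empty cube input")]
    else
      -- the str(type(...)) != "<class 'str'>" branch is unreachable: values are Strings by the type convention
      let lists := encodedCube.toList
      -- for i in lists: try count[i] += 1 / except: count[i] = 1   (i.e. count[i] = count.get(i, 0) + 1)
      let count := lists.foldl (fun d i => d.insert i (d.getD i 0 + 1)) (PySem.Dict.empty : PySem.Dict Char Int)
      -- for j in count.values(): if 9 != j: numCnt = True; break   (the break only stops once True is set)
      let numCnt := count.values.foldl (fun b j => if 9 ≠ j then true else b) false
      -- while k <= len(lists) / while l < len(lists), both stepping by 9, ported as folds over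
      -- pyRange: the inner restart l = k + 18 is (k + 9) + 9 for the incremented k, so each outer k
      -- scans l ∈ pyRange (k+9) len 9; lists[k], lists[l] are always in range there (l < len, k < l),
      -- so Python's indexing is exactly pyGetD
      let faceCheck := (PySem.List.pyRange 4 ((lists.length : Int) + 1) 9).foldl (fun fc k =>
          (PySem.List.pyRange (k + 9) (lists.length : Int) 9).foldl (fun fc l =>
            if PySem.List.pyGetD lists k ' ' = PySem.List.pyGetD lists l ' ' then true else fc) fc) false
      if lists.length ≠ 54 then [("status", "error: Invalid number of total cube elements")]
      else if count.size ≠ 6 then [("status", "error: Cube does not have 6 colors.")]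
      else if numCnt then [("status", "error: Some cube color may not have 9 occurrences")]
      else if faceCheck then [("status", "error: Invalid cube middle face color")]
      else [("status", "ok")]

-- ===== PORT B =====
def check_py_alt (parms : List (String × String)) : List (String × String) :=
  match PySem.Dict.get? (PySem.Dict.mk parms) "cube" with
  | none => [("status", "error: cube is none")]                 -- encodedCube is None
  | some encodedCube =>
    -- isinstance(encodedCube, str) is always true under the type convention
    let s := encodedCube.toList
    let status :=
      if encodedCube = "" then "error: there is empty cube input"
      else if s.length ≠ 54 then "error: Invalid number of total cube elements"
      else if (PySem.Set.ofList s).length ≠ 6 then "error: Cube does not have 6 colors."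
      else if (PySem.Set.ofList s).any (fun c => s.count c != 9) then "error: Some cube color may not have 9 occurrences"
      -- encodedCube[4::9]: the step 9 ≠ 0, so slice? is always some
      else if (PySem.Set.ofList ((PySem.List.slice? s (some 4) none 9).getD [])).length ≠ 6 then "error: Invalid cube middle face color"
      else "ok"
    [("status", status)]

-- ===== PRECONDITION & SPEC =====
def Spec_check_py (parms : List (String × String)) (out : List (String × String)) : Prop := out = check_py_alt parms
instance (parms : List (String × String)) (out : List (String × String)) : Decidable (Spec_check_py parms out) := by unfold Spec_check_py; infer_instance

-- ===== CLAIM (what is proved, stated in full; the proofs are below) =====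
def Claim_equal_check_py : Prop := ∀ (parms : List (String × String)), Dom_check_py parms → Spec_check_py parms (check_py parms)

-- ===== LEMMAS AND PROOFS =====

-- A's counting loop is collections.Counter
theorem pv_count_eq_counter (s : List Char) :
    s.foldl (fun d i => d.insert i (d.getD i 0 + 1)) (PySem.Dict.empty : PySem.Dict Char Int)
      = PySem.Dict.counter s :=
  PySem.Dict.foldl_insert_getD_add_one_eq_counter s

-- len(count) is the number of distinct characters
theorem pv_size_counter (s : List Char) :
    (PySem.Dict.counter s).size = (PySem.Set.ofList s).length := by
  show (PySem.Dict.counter s).items.length = _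
  rw [PySem.Dict.items_counter]
  exact List.length_map ..

-- A's numCnt break-loop over count.values() is B's any() over the distinct characters
theorem pv_numCnt_eq (s : List Char) :
    (PySem.Dict.counter s).values.foldl (fun b j => if 9 ≠ j then true else b) false
      = (PySem.Set.ofList s).any (fun c => s.count c != 9) := by
  have h1 : (fun (b : Bool) (j : Int) => if 9 ≠ j then true else b)
      = (fun b j => if (fun j : Int => decide (9 ≠ j)) j = true then true else b) := by
    funext b j; simp
  rw [h1, PySem.List.foldl_if_true_eq, Bool.false_or]
  have hv : (PySem.Dict.counter s).values
      = (PySem.Set.ofList s).map (fun k => ((s.count k : Int))) := by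
    show (PySem.Dict.counter s).items.map (·.2) = _
    rw [PySem.Dict.items_counter, List.map_map]
    rfl
  rw [hv, List.any_map]
  apply PySem.List.any_congr_mem
  intro x _
  simp only [Function.comp]
  rcases eq_or_ne (s.count x) 9 with hx | hx
  · simp [hx]
  · have h2 : (9 : Int) ≠ (s.count x : Int) := by exact_mod_cast (Ne.symm hx)
    simp [hx, h2]

-- set(xs) has the same size as xs exactly when xs has no duplicates
theorem pv_ofList_len_iff {α : Type} [DecidableEq α] (xs : List α) :
    (PySem.Set.ofList (α := α) xs).length = xs.length ↔ xs.Nodup := by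
  have hmem : ∀ y, y ∈ PySem.Set.ofList xs ↔ y ∈ xs := fun y => PySem.Set.mem_ofList ..
  have hnd : (PySem.Set.ofList xs).Nodup := PySem.Set.nodup_ofList xs
  have hfin : (PySem.Set.ofList xs).toFinset = xs.toFinset := by ext y; simp [hmem]
  have hcard : (PySem.Set.ofList xs).length = xs.toFinset.card := by
    rw [← hfin, List.toFinset_card_of_nodup hnd]
  rw [hcard, List.card_toFinset]
  constructor
  · intro hlen
    rw [← List.Sublist.eq_of_length (List.dedup_sublist xs) hlen]
    exact List.nodup_dedup xs
  · intro hnodup; rw [List.dedup_eq_self.mpr hnodup]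

-- the nested while-loop duplicate scan equals B's set-size test, for a 54-element list
set_option maxHeartbeats 2000000 in
theorem pv_face_eq (s : List Char) (h : s.length = 54) :
    ((PySem.List.pyRange 4 ((s.length : Int) + 1) 9).foldl (fun fc k =>
        (PySem.List.pyRange (k + 9) (s.length : Int) 9).foldl (fun fc l =>
          if PySem.List.pyGetD s k ' ' = PySem.List.pyGetD s l ' ' then true else fc) fc) false)
      = decide ((PySem.Set.ofList ((PySem.List.slice? s (some 4) none 9).getD [])).length ≠ 6) := by
  rcases s with _|⟨a0, _|⟨a1, _|⟨a2, _|⟨a3, _|⟨a4, _|⟨a5, _|⟨a6, _|⟨a7, _|⟨a8, _|⟨a9, _|⟨a10, _|⟨a11, _|⟨a12, _|⟨a13, _|⟨a14, _|⟨a15, _|⟨a16, _|⟨a17, _|⟨a18, _|⟨a19, _|⟨a20, _|⟨a21, _|⟨a22, _|⟨a23, _|⟨a24, _|⟨a25, _|⟨a26, _|⟨a27, _|⟨a28, _|⟨a29, _|⟨a30, _|⟨a31, _|⟨a32, _|⟨a33, _|⟨a34, _|⟨a35, _|⟨a36, _|⟨a37, _|⟨a38, _|⟨a39, _|⟨a40,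 _|⟨a41, _|⟨a42, _|⟨a43, _|⟨a44, _|⟨a45, _|⟨a46, _|⟨a47, _|⟨a48, _|⟨a49, _|⟨a50, _|⟨a51, _|⟨a52, _|⟨a53, _|⟨x, s⟩⟩⟩⟩⟩⟩⟩⟩⟩⟩⟩⟩⟩⟩⟩⟩⟩⟩⟩⟩⟩⟩⟩⟩⟩⟩⟩⟩⟩⟩⟩⟩⟩⟩⟩⟩⟩⟩⟩⟩⟩⟩⟩⟩⟩⟩⟩⟩⟩⟩⟩⟩⟩⟩⟩
  all_goals try (exfalso; simp only [List.length_cons, List.length_nil] at h; omega)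
  norm_num
  rw [show PySem.List.pyRange 4 55 9 = [4, 13, 22, 31, 40, 49] from by decide]
  simp only [List.foldl]
  have hI4 : PySem.List.pyRange (4 + 9) 54 9 = [13, 22, 31, 40, 49] := by decide
  have hI13 : PySem.List.pyRange (13 + 9) 54 9 = [22, 31, 40, 49] := by decide
  have hI22 : PySem.List.pyRange (22 + 9) 54 9 = [31, 40, 49] := by decide
  have hI31 : PySem.List.pyRange (31 + 9) 54 9 = [40, 49] := by decide
  have hI40 : PySem.List.pyRange (40 + 9) 54 9 = [49] := by decide
  have hI49 : PySem.List.pyRange (49 + 9) 54 9 = ([] : List Int) := by decide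
  rw [hI4, hI13, hI22, hI31, hI40, hI49]
  simp only [List.foldl]
  have g4 : PySem.List.pyGetD ([a0, a1, a2, a3, a4, a5, a6, a7, a8, a9, a10, a11, a12, a13, a14, a15, a16, a17, a18, a19, a20, a21, a22, a23, a24, a25, a26, a27, a28, a29, a30, a31, a32, a33, a34, a35, a36, a37, a38, a39, a40, a41, a42, a43, a44, a45, a46, a47, a48, a49, a50, a51, a52, a53] : List Char) 4 ' ' = a4 := rfl
  have g13 : PySem.List.pyGetD ([a0, a1, a2, a3, a4, a5, a6, a7, a8, a9, a10, a11, a12, a13, a14, a15, a16, a17, a18, a19, a20, a21, a22, a23, a24, a25, a26, a27, a28, a29, a30, a31, a32, a33, a34, a35, a36, a37, a38, a39, a40, a41, a42, a43, a44, a45, a46, a47, a48, a49, a50, a51, a52, a53] : List Char) 13 ' ' = a13 := rfl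
  have g22 : PySem.List.pyGetD ([a0, a1, a2, a3, a4, a5, a6, a7, a8, a9, a10, a11, a12, a13, a14, a15, a16, a17, a18, a19, a20, a21, a22, a23, a24, a25, a26, a27, a28, a29, a30, a31, a32, a33, a34, a35, a36, a37, a38, a39, a40, a41, a42, a43, a44, a45, a46, a47, a48, a49, a50, a51, a52, a53] : List Char) 22 ' ' = a22 := rfl
  have g31 : PySem.List.pyGetD ([a0, a1, a2, a3, a4, a5, a6, a7, a8, a9, a10, a11, a12, a13, a14, a15, a16, a17, a18, a19, a20, a21, a22, a23, a24, a25, a26, a27, a28, a29, a30, a31, a32, a33, a34, a35, a36, a37, a38, a39, a40, a41, a42, a43, a44, a45, a46, a47, a48, a49, a50, a51, a52, a53] : List Char) 31 ' ' = a31 := rfl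
  have g40 : PySem.List.pyGetD ([a0, a1, a2, a3, a4, a5, a6, a7, a8, a9, a10, a11, a12, a13, a14, a15, a16, a17, a18, a19, a20, a21, a22, a23, a24, a25, a26, a27, a28, a29, a30, a31, a32, a33, a34, a35, a36, a37, a38, a39, a40, a41, a42, a43, a44, a45, a46, a47, a48, a49, a50, a51, a52, a53] : List Char) 40 ' ' = a40 := rfl
  have g49 : PySem.List.pyGetD ([a0, a1, a2, a3, a4, a5, a6, a7, a8, a9, a10, a11, a12, a13, a14, a15, a16, a17, a18, a19, a20, a21, a22, a23, a24, a25, a26, a27, a28, a29, a30, a31, a32, a33, a34, a35, a36, a37, a38, a39, a40, a41, a42, a43, a44, a45, a46, a47, a48, a49, a50, a51, a52, a53] : List Char) 49 ' ' = a49 := rfl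
  rw [g4, g13, g22, g31, g40, g49]
  have hs : ((PySem.List.slice? ([a0, a1, a2, a3, a4, a5, a6, a7, a8, a9, a10, a11, a12, a13, a14, a15, a16, a17, a18, a19, a20, a21, a22, a23, a24, a25, a26, a27, a28, a29, a30, a31, a32, a33, a34, a35, a36, a37, a38, a39, a40, a41, a42, a43, a44, a45, a46, a47, a48, a49, a50, a51, a52, a53] : List Char) (some 4) none 9).getD [])
      = [a4, a13, a22, a31, a40, a49] := by with_unfolding_all rfl
  rw [hs]
  have h2 : ¬ (PySem.Set.ofList ([a4, a13, a22, a31, a40, a49] : List Char)).length = 6 ↔ ¬ ([a4, a13, a22, a31, a40, a49] : List Char).Nodup := by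
    have := pv_ofList_len_iff ([a4, a13, a22, a31, a40, a49] : List Char)
    simp only [List.length_cons, List.length_nil] at this
    rw [this]
  rw [Bool.eq_iff_iff]
  simp only [Bool.not_eq_eq_eq_not, Bool.not_true, decide_eq_false_iff_not, Bool.or_eq_true,
    decide_eq_true_eq]
  rw [h2]
  simp only [List.nodup_cons, List.mem_cons, List.not_mem_nil, List.nodup_nil, or_false, and_true,
    not_or]
  constructor
  · intro hp hq
    rcases hq with ⟨⟨q1, q2, q3, q4, q5⟩, ⟨q6, q7, q8, q9⟩, ⟨q10, q11, q12⟩, ⟨q13, q14⟩, q15, -⟩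
    rcases hp with hh|hh|hh|hh|hh|hh|hh|hh|hh|hh|hh|hh|hh|hh|hh|hh
    exacts [q15 hh, q14 hh, q13 hh, q12 hh, q11 hh, q10 hh, q9 hh, q8 hh, q7 hh, q6 hh, q5 hh,
      q4 hh, q3 hh, q2 hh, q1 hh, absurd hh (by decide)]
  · intro hq
    by_contra hp
    simp only [not_or] at hp
    obtain ⟨p15, p14, p13, p12, p11, p10, p9, p8, p7, p6, p5, p4, p3, p2, p1, -⟩ := hp
    exact hq ⟨⟨p1, p2, p3, p4, p5⟩, ⟨p6, p7, p8, p9⟩, ⟨p10, p11, p12⟩, ⟨p13, p14⟩, p15, not_false⟩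

-- ===== VERDICT (by name: the statement is the Claim_ definition above) =====
theorem check_py_spec : Claim_equal_check_py := by
  intro parms _
  unfold Spec_check_py check_py check_py_alt
  cases hg : PySem.Dict.get? (PySem.Dict.mk parms) "cube" with
  | none => rfl
  | some c =>
    by_cases hc : c = ""
    · simp only [if_pos hc]
    · simp only [if_neg hc, pv_count_eq_counter, pv_size_counter, pv_numCnt_eq]
      by_cases h54 : c.toList.length = 54
      · rw [pv_face_eq c.toList h54]
        simp only [decide_eq_true_eq]
        split_ifs <;> rfl
      · have h54' : c.toList.length ≠ 54 := h54
        rw [if_pos h54', if_pos h54']
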